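-- pv_equiv track=rewrite | github.com/benetherington/Smart_D20 | chunk_test.py | chunk_with_pagination
-- ===== SOURCE A (Python) =====
-- page_length = 6
--
-- def chunk_with_pagination(to_chunk, chunked=None, page=None):
--     '''
--     Recursive function used to chunk up a raw list into pages.
--     Returns a list of lists (pages), self.page_length long, with
--     next and/or previous buttons at the ends.
--     '''
--     if chunked == None:
--       chunked = []
--     if page == None:
--       page = 0
--     buttons = []
--     # decide if previous button is required
--     if page > 0:
--       buttons.append('previous')
--     # decide if next button is required
--     if len(to_chunk) > page_length-len(buttons):
--       # add a next button
--       buttons.append('next')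
--       # prepend menu items to fill up the rest of the spaces
--       this_chunk = to_chunk[0:page_length-len(buttons)]
--       chunked.append(this_chunk+buttons)
--       del to_chunk[0:page_length-1]
--       # get to work on the next page
--       page += 1
--       return chunk_with_pagination(to_chunk, chunked, page)
--     else:
--       # no next button is required, prepend the rest of the items
--       chunked.append(to_chunk+buttons)
--       # And we're done!
--       return chunked
-- ===== SOURCE B (Python) =====
-- page_length = 6
--
-- def chunk_with_pagination(to_chunk, chunked=None, page=None):
--     pages = [] if chunked is None else chunked
--     p = 0 if page is None else page
--     i = 0
--     while True:
--         prev = ['previous'] if p > 0 else []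
--         if len(to_chunk) - i > page_length - len(prev):
--             pages.append(to_chunk[i:i + page_length - len(prev) - 1] + prev + ['next'])
--             i += page_length - 1
--             p += 1
--         else:
--             pages.append(to_chunk[i:] + prev)
--             return pages
-- ===== Notes on version B (the rewrite author's own statement) =====
-- stated objective: faster
-- what changed: Replaces A's mutate-and-recurse scheme (del a 5-element prefix of to_chunk, then recurse on the shrunken list) with a single non-recursive index-based while loop that slices pages out of the untouched list, advancing an index by 5 per page.
import Mathlib
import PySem

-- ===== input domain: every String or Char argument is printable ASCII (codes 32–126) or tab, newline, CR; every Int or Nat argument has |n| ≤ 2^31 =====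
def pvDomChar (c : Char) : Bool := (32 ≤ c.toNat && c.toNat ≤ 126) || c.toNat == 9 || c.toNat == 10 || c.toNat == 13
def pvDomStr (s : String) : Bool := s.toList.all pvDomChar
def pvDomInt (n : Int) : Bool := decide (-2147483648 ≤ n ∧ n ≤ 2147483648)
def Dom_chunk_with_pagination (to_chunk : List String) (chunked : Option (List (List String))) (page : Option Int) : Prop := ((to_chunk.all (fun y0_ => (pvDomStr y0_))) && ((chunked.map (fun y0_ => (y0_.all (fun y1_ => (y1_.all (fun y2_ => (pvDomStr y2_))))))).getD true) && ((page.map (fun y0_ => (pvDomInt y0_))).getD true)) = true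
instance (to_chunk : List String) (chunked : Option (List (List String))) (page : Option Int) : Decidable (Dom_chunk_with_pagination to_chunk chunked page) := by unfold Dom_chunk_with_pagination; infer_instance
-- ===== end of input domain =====

-- B replaces A's mutate-and-recurse scheme (which repeatedly deletes a prefix of to_chunk)
-- by a single pure index-based loop over the untouched list: simpler, and no O(n) deletion per page.
-- Equivalence is about the RETURN value only: A mutates its to_chunk argument (del), B does not.

-- ===== PORT A =====
-- A's tail recursion; 'del to_chunk[0:page_length-1]' becomes passing to_chunk.drop 5.
def chunkLoopA (to_chunk : List String) (chunked : List (List String)) (page : Int) : List (List String) :=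
  let buttons : List String := if page > 0 then ["previous"] else []
  if h : (to_chunk.length : Int) > 6 - buttons.length then
    let buttons2 := buttons ++ ["next"]
    let this_chunk := PySem.List.slice to_chunk (some 0) (some (6 - (buttons2.length : Int)))
    chunkLoopA (to_chunk.drop 5) (chunked ++ [this_chunk ++ buttons2]) (page + 1)
  else
    chunked ++ [to_chunk ++ buttons]
termination_by to_chunk.length
decreasing_by
  simp only [List.length_drop]
  have : 4 ≤ (6 : Int) - buttons.length := by
    simp only [buttons]; split_ifs <;> simp
  omega

def chunk_with_pagination (to_chunk : List String) (chunked : Option (List (List String))) (page : Option Int) : List (List String) :=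
  let chunked := chunked.getD []      -- if chunked == None: chunked = []
  let page := page.getD 0             -- if page == None: page = 0
  chunkLoopA to_chunk chunked page

-- ===== PORT B =====
-- B's 'while True' loop over an index i into the (unmutated) list.
def chunkLoopB (to_chunk : List String) (pages : List (List String)) (p : Int) (i : Nat) : List (List String) :=
  let prev : List String := if p > 0 then ["previous"] else []
  if h : (to_chunk.length : Int) - i > 6 - prev.length then
    chunkLoopB to_chunk
      (pages ++ [PySem.List.slice to_chunk (some (i : Int)) (some ((i : Int) + (6 - (prev.length : Int)) - 1)) ++ prev ++ ["next"]])
      (p + 1) (i + 5)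
  else
    pages ++ [PySem.List.slice to_chunk (some (i : Int)) none ++ prev]
termination_by to_chunk.length - i
decreasing_by
  have : 4 ≤ (6 : Int) - prev.length := by
    simp only [prev]; split_ifs <;> simp
  omega

def chunk_with_pagination_alt (to_chunk : List String) (chunked : Option (List (List String))) (page : Option Int) : List (List String) :=
  let pages := chunked.getD []
  let p := page.getD 0
  chunkLoopB to_chunk pages p 0

-- ===== PRECONDITION & SPEC =====
def Spec_chunk_with_pagination (to_chunk : List String) (chunked : Option (List (List String))) (page : Option Int) (out : List (List String)) : Prop := out = chunk_with_pagination_alt to_chunk chunked page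
instance (to_chunk : List String) (chunked : Option (List (List String))) (page : Option Int) (out : List (List String)) : Decidable (Spec_chunk_with_pagination to_chunk chunked page out) := by unfold Spec_chunk_with_pagination; infer_instance

-- ===== CLAIM (what is proved, stated in full; the proofs are below) =====
def Claim_equal_chunk_with_pagination : Prop := ∀ (to_chunk : List String) (chunked : Option (List (List String))) (page : Option Int), Dom_chunk_with_pagination to_chunk chunked page → Spec_chunk_with_pagination to_chunk chunked page (chunk_with_pagination to_chunk chunked page)

-- ===== LEMMAS AND PROOFS =====

-- Loop correspondence: A running on the suffix full.drop i equals B running on full at index i.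
theorem loopAB (full : List String) (pages : List (List String)) (p : Int) (i : Nat)
    (hi : i ≤ full.length) :
    chunkLoopA (full.drop i) pages p = chunkLoopB full pages p i := by
  unfold chunkLoopA chunkLoopB
  have hlen : ((full.drop i).length : Int) = (full.length : Int) - i := by
    simp only [List.length_drop]; omega
  by_cases hp : p > 0
  · simp only [hp, if_pos]
    rw [hlen]
    by_cases hc : (full.length : Int) - i > 6 - ((["previous"] : List String).length : Int)
    · rw [dif_pos hc, dif_pos hc]
      have h5 : i + 5 ≤ full.length := by
        simp only [List.length_cons, List.length_nil] at hc; omega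
      have hchunk : PySem.List.slice (full.drop i) (some 0)
            (some (6 - (((["previous"] : List String) ++ ["next"]).length : Int)))
          = PySem.List.slice full (some (i : Int))
            (some ((i : Int) + (6 - ((["previous"] : List String).length : Int)) - 1)) := by
        rw [PySem.List.slice_toNat _ (by norm_num) (by norm_num),
            PySem.List.slice_toNat _ (by positivity) (by simp; omega)]
        simp only [Int.toNat_zero, List.drop_zero, Nat.sub_zero]
        have h1 : ((6 : Int) - (((["previous"] : List String) ++ ["next"]).length : Int)).toNat = 4 := by simp
        have h2 : ((i : Int) + (6 - ((["previous"] : List String).length : Int)) - 1).toNat = i + 4 := by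
          simp; omega
        rw [h1, h2, Int.toNat_natCast]
        simp
      rw [hchunk, List.drop_drop]
      have := loopAB full
        (pages ++ [PySem.List.slice full (some (i : Int))
          (some ((i : Int) + (6 - ((["previous"] : List String).length : Int)) - 1)) ++ ["previous"] ++ ["next"]])
        (p + 1) (i + 5) h5
      simpa using this
    · rw [dif_neg hc, dif_neg hc]
      rw [PySem.List.slice_from _ (by positivity), Int.toNat_natCast]
  · simp only [hp, if_false]
    rw [hlen]
    by_cases hc : (full.length : Int) - i > 6 - (([] : List String).length : Int)
    · rw [dif_pos hc, dif_pos hc]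
      have h5 : i + 5 ≤ full.length := by
        simp only [List.length_nil] at hc; omega
      have hchunk : PySem.List.slice (full.drop i) (some 0)
            (some (6 - ((([] : List String) ++ ["next"]).length : Int)))
          = PySem.List.slice full (some (i : Int))
            (some ((i : Int) + (6 - (([] : List String).length : Int)) - 1)) := by
        rw [PySem.List.slice_toNat _ (by norm_num) (by norm_num),
            PySem.List.slice_toNat _ (by positivity) (by simp; omega)]
        simp only [Int.toNat_zero, List.drop_zero, Nat.sub_zero]
        have h1 : ((6 : Int) - ((([] : List String) ++ ["next"]).length : Int)).toNat = 5 := by simp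
        have h2 : ((i : Int) + (6 - (([] : List String).length : Int)) - 1).toNat = i + 5 := by
          simp; omega
        rw [h1, h2, Int.toNat_natCast]
        simp
      rw [hchunk, List.drop_drop]
      have := loopAB full
        (pages ++ [PySem.List.slice full (some (i : Int))
          (some ((i : Int) + (6 - (([] : List String).length : Int)) - 1)) ++ [] ++ ["next"]])
        (p + 1) (i + 5) h5
      simpa using this
    · rw [dif_neg hc, dif_neg hc]
      rw [PySem.List.slice_from _ (by positivity), Int.toNat_natCast]
termination_by full.length - i

-- ===== VERDICT (by name: the statement is the Claim_ definition above) =====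
theorem chunk_with_pagination_spec : Claim_equal_chunk_with_pagination := by
  intro to_chunk chunked page _
  unfold Spec_chunk_with_pagination chunk_with_pagination chunk_with_pagination_alt
  have := loopAB to_chunk (chunked.getD []) (page.getD 0) 0 (Nat.zero_le _)
  simpa using this
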